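-- pv_equiv track=rewrite | github.com/mcook42/Py_R_Converters | r2py-syntax-converter.py | ignoreStrReplace
-- ===== SOURCE A (Python) =====
-- def ignoreStrReplace(line, cur, rep, count=None):
--     """Wrapper for str.replace to ignore strings"""
--     # Lazy fix to count being None
--     if not count:
--         count = 50
--     if '"' in line:
--         #Split string at quotation marks
--         lsplit = line.split('"')
--         #Replace items contained within even partitions
--         lsplit[::2] = [spl.replace(cur, rep, count) for spl in lsplit[::2]]
--         #Rejoin the partitions
--         line = '"'.join(lsplit)
--     else:
--         line = line.replace(cur, rep, count)
--     return line
-- ===== SOURCE B (Python) =====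
-- def ignoreStrReplace(line, cur, rep, count=None):
--     """Single-pass scanner: buffer unquoted runs, apply replace per run, pass quoted text through."""
--     if not count:
--         count = 50
--     out = []
--     buf = []
--     in_quote = False
--     for ch in line:
--         if ch == '"':
--             if in_quote:
--                 out.append('"')
--             else:
--                 out.append(''.join(buf).replace(cur, rep, count))
--                 out.append('"')
--                 buf = []
--             in_quote = not in_quote
--         elif in_quote:
--             out.append(ch)
--         else:
--             buf.append(ch)
--     if not in_quote:
--         out.append(''.join(buf).replace(cur, rep, count))
--     return ''.join(out)
-- ===== Notes on version B (the rewrite author's own statement) =====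
-- stated objective: alternative
-- what changed: Replaced the split-on-quote / replace-even-partitions / rejoin pipeline by a single left-to-right character scanner that maintains an in_quote flag, buffers each unquoted run and applies str.replace to the run when a quote or the end of the line is reached.
import Mathlib
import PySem

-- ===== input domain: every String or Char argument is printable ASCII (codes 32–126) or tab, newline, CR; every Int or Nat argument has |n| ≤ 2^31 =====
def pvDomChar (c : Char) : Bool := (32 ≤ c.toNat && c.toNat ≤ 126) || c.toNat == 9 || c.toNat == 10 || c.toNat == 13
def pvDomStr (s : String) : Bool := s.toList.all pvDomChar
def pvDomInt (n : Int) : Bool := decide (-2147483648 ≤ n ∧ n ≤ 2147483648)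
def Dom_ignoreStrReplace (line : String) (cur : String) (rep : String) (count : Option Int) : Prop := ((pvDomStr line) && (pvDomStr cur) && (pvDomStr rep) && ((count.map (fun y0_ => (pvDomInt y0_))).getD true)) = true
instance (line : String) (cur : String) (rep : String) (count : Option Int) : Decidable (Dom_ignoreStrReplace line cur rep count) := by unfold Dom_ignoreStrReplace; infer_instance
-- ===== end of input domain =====

-- B replaces A's split-on-quote / replace-even-partitions / rejoin pipeline by a single
-- character scanner with an in-quote flag (alternative decomposition, same cost).


-- ===== PORT A =====
-- shared hand-written primitive: Python's three-argument s.replace(cur, rep, cnt)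
-- (PySem.Chars.replace has no count parameter); exact for every Int cnt: cnt = 0
-- replaces nothing, negative cnt replaces all occurrences (decrementing never
-- reaches 0), empty cur inserts rep at each boundary including the end.
def replaceCnt (cur rep : List Char) : Int → List Char → List Char
  | cnt, s =>
    if cnt = 0 then s
    else if hc : cur = [] then
      match s with
      | [] => rep
      | c :: r => rep ++ c :: replaceCnt cur rep (cnt - 1) r
    else
      if hp : cur.isPrefixOf s then rep ++ replaceCnt cur rep (cnt - 1) (s.drop cur.length)
      else
        match s with
        | [] => []
        | c :: r => c :: replaceCnt cur rep cnt r
termination_by cnt s => s.length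
decreasing_by
  · simp
  · have h1 : cur <+: s := List.isPrefixOf_iff_prefix.mp hp
    have h2 : cur.length ≤ s.length := h1.length_le
    have h3 : 0 < cur.length := List.length_pos_iff.mpr hc
    simp
    omega
  · simp

-- lsplit[::2] = [spl.replace(cur, rep, count) for spl in lsplit[::2]] : replace the
-- items at even positions, keep the odd ones.
def replEven (cur rep : List Char) (cnt : Int) : List (List Char) → List (List Char)
  | [] => []
  | [a] => [replaceCnt cur rep cnt a]
  | a :: b :: r => replaceCnt cur rep cnt a :: b :: replEven cur rep cnt r

def ignoreStrReplace (line : String) (cur : String) (rep : String) (count : Option Int) : String :=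
  -- if not count: count = 50  (falsy: None or 0)
  let cnt : Int := match count with
    | none => 50
    | some c => if c = 0 then 50 else c
  if PySem.Chars.isIn ['"'] line.toList then
    let lsplit := PySem.Chars.splitOn line.toList ['"']
    let lsplit := replEven cur.toList rep.toList cnt lsplit
    String.mk (PySem.Chars.join ['"'] lsplit)
  else
    String.mk (replaceCnt cur.toList rep.toList cnt line.toList)

-- ===== PORT B =====
-- loop body of B: state (out, buf, in_quote)
def bStep (cur rep : List Char) (cnt : Int) :
    (List (List Char) × List Char × Bool) → Char → (List (List Char) × List Char × Bool)
  | (o, b, q), ch =>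
    if ch = '"' then
      if q then (o ++ [['"']], b, !q)
      else (o ++ [replaceCnt cur rep cnt b, ['"']], [], !q)
    else if q then (o ++ [[ch]], b, q)
    else (o, b ++ [ch], q)

def ignoreStrReplace_alt (line : String) (cur : String) (rep : String) (count : Option Int) : String :=
  let cnt : Int := match count with
    | none => 50
    | some c => if c = 0 then 50 else c
  let st := line.toList.foldl (bStep cur.toList rep.toList cnt) ([], [], false)
  let out := if st.2.2 then st.1 else st.1 ++ [replaceCnt cur.toList rep.toList cnt st.2.1]
  String.mk (PySem.Chars.join [] out)

-- ===== PRECONDITION & SPEC =====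
def Spec_ignoreStrReplace (line : String) (cur : String) (rep : String) (count : Option Int) (out : String) : Prop := out = ignoreStrReplace_alt line cur rep count
instance (line : String) (cur : String) (rep : String) (count : Option Int) (out : String) : Decidable (Spec_ignoreStrReplace line cur rep count out) := by unfold Spec_ignoreStrReplace; infer_instance

-- ===== CLAIM (what is proved, stated in full; the proofs are below) =====
def Claim_equal_ignoreStrReplace : Prop := ∀ (line : String) (cur : String) (rep : String) (count : Option Int), Dom_ignoreStrReplace line cur rep count → Spec_ignoreStrReplace line cur rep count (ignoreStrReplace line cur rep count)

-- ===== LEMMAS AND PROOFS =====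

-- structural version of line.split('"')
def sp : List Char → List (List Char)
  | [] => [[]]
  | c :: r =>
    if c = '"' then [] :: sp r
    else match sp r with
      | [] => [[c]]
      | h :: t => (c :: h) :: t

theorem sp_cons (l : List Char) : ∃ h t, sp l = h :: t := by
  induction l with
  | nil => exact ⟨[], [], rfl⟩
  | cons c r ih =>
    obtain ⟨h, t, hr⟩ := ih
    by_cases hc : c = '"'
    · exact ⟨[], sp r, by simp [sp, hc]⟩
    · exact ⟨c :: h, t, by simp [sp, hc, hr]⟩

theorem go_spec (fuel : Nat) : ∀ (l cur : List Char) (acc : List (List Char)) (h : List Char)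
    (t : List (List Char)), l.length < fuel → sp l = h :: t →
    PySem.Chars.splitOn.go ['"'] fuel l cur acc = acc.reverse ++ (cur.reverse ++ h) :: t := by
  induction fuel with
  | zero => intro l cur acc h t hlt; omega
  | succ fuel ih =>
    intro l cur acc h t hlt hsp
    cases l with
    | nil =>
      simp [sp] at hsp
      obtain ⟨he, ht⟩ := hsp
      subst he; subst ht
      simp [PySem.Chars.splitOn.go]
    | cons c r =>
      by_cases hc : c = '"'
      · subst hc
        simp [sp] at hsp
        obtain ⟨he, ht⟩ := hsp
        subst he; subst ht
        obtain ⟨h', t', hr⟩ := sp_cons r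
        rw [PySem.Chars.splitOn.go]
        simp only [List.isPrefixOf, Bool.and_true, beq_self_eq_true, if_pos,
          List.length_cons, List.length_nil, List.drop_succ_cons, List.drop_zero]
        rw [ih r [] (cur.reverse :: acc) h' t' (by simp at hlt; omega) hr]
        simp [hr]
      · obtain ⟨h', t', hr⟩ := sp_cons r
        simp [sp, hc, hr] at hsp
        rw [PySem.Chars.splitOn.go]
        obtain ⟨he, ht⟩ := hsp
        subst he; subst ht
        have : (['"'].isPrefixOf (c :: r)) = false := by
          simp [List.isPrefixOf]; exact fun hh => hc hh.symm
        rw [this]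
        simp only [Bool.false_eq_true, if_false]
        rw [ih r (c :: cur) acc h' t' (by simp at hlt; omega) hr]
        simp

theorem splitOn_eq_sp (l : List Char) : PySem.Chars.splitOn l ['"'] = sp l := by
  obtain ⟨h, t, hs⟩ := sp_cons l
  unfold PySem.Chars.splitOn
  rw [go_spec (l.length + 1) l [] [] h t (by omega) hs]
  simp [hs]

-- the scanner's meaning, written as mutual structural recursion:
-- scanE l b = output of B on remaining input l, outside quotes with buffer b;
-- scanO l   = output of B on remaining input l, inside quotes.
mutual
def scanE (cur rep : List Char) (cnt : Int) : List Char → List Char → List Char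
  | [], b => replaceCnt cur rep cnt b
  | c :: r, b =>
    if c = '"' then replaceCnt cur rep cnt b ++ '"' :: scanO cur rep cnt r
    else scanE cur rep cnt r (b ++ [c])
def scanO (cur rep : List Char) (cnt : Int) : List Char → List Char
  | [] => []
  | c :: r => if c = '"' then '"' :: scanE cur rep cnt r [] else c :: scanO cur rep cnt r
end

theorem join_nil_flatten (xs : List (List Char)) : PySem.Chars.join [] xs = xs.flatten := by
  induction xs with
  | nil => simp [PySem.Chars.join_nil]
  | cons a r ih =>
    cases r with
    | nil => simp [PySem.Chars.join_singleton]
    | cons b r' => rw [PySem.Chars.join_cons_cons]; simp [ih]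

theorem join_cons_head (c : Char) (h : List Char) (rest : List (List Char)) :
    PySem.Chars.join ['"'] ((c :: h) :: rest) = c :: PySem.Chars.join ['"'] (h :: rest) := by
  cases rest with
  | nil => simp [PySem.Chars.join_singleton]
  | cons x r => rw [PySem.Chars.join_cons_cons, PySem.Chars.join_cons_cons]; simp

theorem replEven_ne_nil (cur rep : List Char) (cnt : Int) (a : List Char) (r : List (List Char)) :
    replEven cur rep cnt (a :: r) ≠ [] := by
  cases r <;> simp [replEven]

-- A's quote branch equals the scanner (mutual invariant, proved jointly).
theorem split_scan (cur rep : List Char) (cnt : Int) (l : List Char) :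
    (∀ b h t, sp l = h :: t →
      PySem.Chars.join ['"'] (replEven cur rep cnt ((b ++ h) :: t)) = scanE cur rep cnt l b) ∧
    (∀ h t, sp l = h :: t →
      PySem.Chars.join ['"'] (h :: replEven cur rep cnt t) = scanO cur rep cnt l) := by
  induction l with
  | nil =>
    constructor
    · intro b h t hsp
      simp [sp] at hsp
      obtain ⟨he, ht⟩ := hsp
      subst he; subst ht
      simp [replEven, PySem.Chars.join_singleton, scanE]
    · intro h t hsp
      simp [sp] at hsp
      obtain ⟨he, ht⟩ := hsp
      subst he; subst ht
      simp [replEven, PySem.Chars.join_singleton, scanO]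
  | cons c r ih =>
    by_cases hc : c = '"'
    · subst hc
      constructor
      · intro b h t hsp
        simp [sp] at hsp
        obtain ⟨he, ht⟩ := hsp
        subst he; subst ht
        obtain ⟨h', t', hr⟩ := sp_cons r
        rw [hr]
        simp only [List.append_nil]
        show PySem.Chars.join ['"'] (replEven cur rep cnt (b :: h' :: t')) = _
        rw [show replEven cur rep cnt (b :: h' :: t') =
              replaceCnt cur rep cnt b :: h' :: replEven cur rep cnt t' from rfl]
        rw [PySem.Chars.join_cons_cons]
        rw [ih.2 h' t' hr]
        simp [scanE]
      · intro h t hsp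
        simp [sp] at hsp
        obtain ⟨he, ht⟩ := hsp
        subst he; subst ht
        obtain ⟨h', t', hr⟩ := sp_cons r
        rw [hr]
        have hne := replEven_ne_nil cur rep cnt h' t'
        obtain ⟨x, xs, hx⟩ : ∃ x xs, replEven cur rep cnt (h' :: t') = x :: xs := by
          cases hxx : replEven cur rep cnt (h' :: t') with
          | nil => exact absurd hxx hne
          | cons x xs => exact ⟨x, xs, rfl⟩
        rw [hx, PySem.Chars.join_cons_cons]
        simp only [List.nil_append]
        rw [← hx]
        have := ih.1 [] h' t' hr
        simp only [List.nil_append] at this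
        rw [this]
        simp [scanO]
    · obtain ⟨h', t', hr⟩ := sp_cons r
      constructor
      · intro b h t hsp
        simp [sp, hc, hr] at hsp
        obtain ⟨he, ht⟩ := hsp
        subst he; subst ht
        have : b ++ c :: h' = (b ++ [c]) ++ h' := by simp
        rw [this, ih.1 (b ++ [c]) h' t' hr]
        simp [scanE, hc]
      · intro h t hsp
        simp [sp, hc, hr] at hsp
        obtain ⟨he, ht⟩ := hsp
        subst he; subst ht
        rw [join_cons_head, ih.2 h' t' hr]
        simp [scanO, hc]

-- B's fold equals the scanner.
theorem foldl_scan (cur rep : List Char) (cnt : Int) (l : List Char) :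
    (∀ (o : List (List Char)) (b : List Char),
      (let st := l.foldl (bStep cur rep cnt) (o, b, false)
       (if st.2.2 then st.1 else st.1 ++ [replaceCnt cur rep cnt st.2.1]).flatten)
        = o.flatten ++ scanE cur rep cnt l b) ∧
    (∀ (o : List (List Char)),
      (let st := l.foldl (bStep cur rep cnt) (o, [], true)
       (if st.2.2 then st.1 else st.1 ++ [replaceCnt cur rep cnt st.2.1]).flatten)
        = o.flatten ++ scanO cur rep cnt l) := by
  induction l with
  | nil =>
    constructor
    · intro o b; simp [scanE]
    · intro o; simp [scanO]
  | cons c r ih =>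
    constructor
    · intro o b
      by_cases hc : c = '"'
      · subst hc
        have hstep : bStep cur rep cnt (o, b, false) '"'
            = (o ++ [replaceCnt cur rep cnt b, ['"']], [], true) := by simp [bStep]
        rw [List.foldl_cons, hstep, ih.2 (o ++ [replaceCnt cur rep cnt b, ['"']])]
        simp [scanE]
      · have hstep : bStep cur rep cnt (o, b, false) c = (o, b ++ [c], false) := by
          simp [bStep, hc]
        rw [List.foldl_cons, hstep, ih.1 o (b ++ [c])]
        simp [scanE, hc]
    · intro o
      by_cases hc : c = '"'
      · subst hc
        have hstep : bStep cur rep cnt (o, [], true) '"' = (o ++ [['"']], [], false) := by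
          simp [bStep]
        rw [List.foldl_cons, hstep, ih.1 (o ++ [['"']]) []]
        simp [scanO]
      · have hstep : bStep cur rep cnt (o, [], true) c = (o ++ [[c]], [], true) := by
          simp [bStep, hc]
        rw [List.foldl_cons, hstep, ih.2 (o ++ [[c]])]
        simp [scanO, hc]

-- quote-free segment: the scanner is one plain replace.
theorem scanE_noquote (cur rep : List Char) (cnt : Int) (l : List Char)
    (hl : '"' ∉ l) : ∀ b, scanE cur rep cnt l b = replaceCnt cur rep cnt (b ++ l) := by
  induction l with
  | nil => intro b; simp [scanE]
  | cons c r ih =>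
    intro b
    have hc : c ≠ '"' := fun h => hl (h ▸ List.mem_cons_self)
    have hr : '"' ∉ r := fun h => hl (List.mem_cons_of_mem _ h)
    simp [scanE, hc, ih hr]

theorem not_infix_singleton (l : List Char) (h : ¬ ['"'] <:+: l) : '"' ∉ l := by
  intro hm
  obtain ⟨s, t, hst⟩ := List.mem_iff_append.mp hm
  exact h ⟨s, t, by simp [hst]⟩

-- ===== VERDICT (by name: the statement is the Claim_ definition above) =====
theorem ignoreStrReplace_spec : Claim_equal_ignoreStrReplace := by
  intro line cur rep count hdom
  clear hdom
  unfold Spec_ignoreStrReplace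
  simp only [ignoreStrReplace, ignoreStrReplace_alt]
  rw [join_nil_flatten]
  rw [(foldl_scan cur.toList rep.toList _ line.toList).1 [] []]
  simp only [List.flatten_nil, List.nil_append]
  by_cases hq : PySem.Chars.isIn ['"'] line.toList
  · rw [if_pos hq]
    obtain ⟨h, t, hs⟩ := sp_cons line.toList
    rw [splitOn_eq_sp, hs]
    have := (split_scan cur.toList rep.toList (match count with | none => (50:Int) | some c => if c = 0 then 50 else c) line.toList).1 [] h t hs
    simp only [List.nil_append] at this
    rw [this]
  · rw [if_neg hq]
    have hninf : ¬ ['"'] <:+: line.toList := by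
      have hqq : PySem.Chars.isIn ['"'] line.toList = false := by
        cases hx : PySem.Chars.isIn ['"'] line.toList
        · rfl
        · exact absurd hx hq
      exact (PySem.Chars.isIn_eq_false_iff _ _).mp hqq
    rw [scanE_noquote _ _ _ _ (not_infix_singleton _ hninf) []]
    simp
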